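-- pv_equiv track=rewrite | github.com/hilltopcurry-star/agent50-supreme-web | agent_level1.py | sanitize_project_name
-- ===== SOURCE A (Python) =====
-- def sanitize_project_name(raw_name: str) -> str:
--     name = raw_name.strip()
--     if not name:
--         return "demo_project"
--     invalid_chars = '<>:"/\\|?*'
--     for ch in invalid_chars:
--         name = name.replace(ch, "_")
--     name = name.replace(" ", "_").lower()
--     return name or "project"
-- ===== SOURCE B (Python) =====
-- def sanitize_project_name(raw_name: str) -> str:
--     name = raw_name.strip()
--     if not name:
--         return "demo_project"
--     bad = set('<>:"/\\|?* ')
--     return "".join("_" if c in bad else c.lower() for c in name)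
-- ===== Notes on version B (the rewrite author's own statement) =====
-- stated objective: idiomatic
-- what changed: A rewrites the whole string once per invalid character (ten sequential str.replace passes plus a final lower); B makes a single per-character pass with a membership set, lowercasing as it goes.
import Mathlib
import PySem

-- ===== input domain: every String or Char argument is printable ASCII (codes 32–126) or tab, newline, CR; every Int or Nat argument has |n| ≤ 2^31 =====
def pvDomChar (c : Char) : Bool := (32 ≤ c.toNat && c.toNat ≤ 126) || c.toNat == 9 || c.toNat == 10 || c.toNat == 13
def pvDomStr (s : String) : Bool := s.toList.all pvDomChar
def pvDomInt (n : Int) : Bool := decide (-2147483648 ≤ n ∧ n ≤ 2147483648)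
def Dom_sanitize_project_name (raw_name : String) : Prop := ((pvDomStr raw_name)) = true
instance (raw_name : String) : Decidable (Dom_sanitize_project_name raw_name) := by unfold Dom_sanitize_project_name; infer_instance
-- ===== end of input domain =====

-- B replaces A's ten sequential str.replace passes by one per-character pass with a
-- membership set, lowercasing as it goes (idiomatic single traversal).


-- ===== PORT A =====
-- literal transliteration of A: strip, empty guard, a replace pass per invalid char,
-- then replace(" ","_").lower(), then `name or "project"`.
def sanitize_project_name (raw_name : String) : String :=
  let name := PySem.Str.strip raw_name
  if name = "" then "demo_project"
  else
    let invalid_chars : List Char := ['<', '>', ':', '"', '/', '\\', '|', '?', '*']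
    let name := invalid_chars.foldl (fun n ch => PySem.Str.replace n (String.ofList [ch]) "_") name
    let name := PySem.Str.lower (PySem.Str.replace name " " "_")
    if name = "" then "project" else name

-- ===== PORT B =====
-- literal transliteration of B: strip, empty guard, one pass over the characters,
-- '_' for members of the bad set, lowercased char otherwise.
def sanitize_project_name_alt (raw_name : String) : String :=
  let name := PySem.Str.strip raw_name
  if name = "" then "demo_project"
  else
    let bad := PySem.Set.ofList ['<', '>', ':', '"', '/', '\\', '|', '?', '*', ' ']
    String.ofList (name.toList.map (fun c => if c ∈ bad then '_' else PySem.Chars.lowerChar c))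

-- ===== PRECONDITION & SPEC =====
def Spec_sanitize_project_name (raw_name : String) (out : String) : Prop := out = sanitize_project_name_alt raw_name
instance (raw_name : String) (out : String) : Decidable (Spec_sanitize_project_name raw_name out) := by unfold Spec_sanitize_project_name; infer_instance

-- ===== CLAIM (what is proved, stated in full; the proofs are below) =====
def Claim_equal_sanitize_project_name : Prop := ∀ (raw_name : String), Dom_sanitize_project_name raw_name → Spec_sanitize_project_name raw_name (sanitize_project_name raw_name)

-- ===== LEMMAS AND PROOFS =====

-- the go loop of PySem.Chars.replace for a single-char needle is a pointwise map
theorem replace_go_single (a b : Char) :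
    ∀ (fuel : Nat) (l acc : List Char), l.length ≤ fuel →
      PySem.Chars.replace.go [a] [b] fuel l acc
        = acc.reverse ++ l.map (fun c => if c = a then b else c) := by
  intro fuel
  induction fuel with
  | zero =>
    intro l acc h
    have : l = [] := List.eq_nil_of_length_eq_zero (Nat.le_zero.mp h)
    subst this; simp [PySem.Chars.replace.go]
  | succ n ih =>
    intro l acc h
    cases l with
    | nil => simp [PySem.Chars.replace.go]
    | cons c t =>
      have hlen : t.length ≤ n := by simpa using Nat.le_of_succ_le_succ h
      by_cases hc : c = a
      · subst hc
        simp only [PySem.Chars.replace.go, List.isPrefixOf, beq_self_eq_true, Bool.true_and,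
          if_pos, List.map]
        rw [show List.drop [c].length (c :: t) = t from rfl,
            show [b].reverse ++ acc = b :: acc from rfl,
            ih t (b :: acc) hlen]
        simp
      · have hba : (a == c) = false := beq_eq_false_iff_ne.mpr (Ne.symm hc)
        simp only [PySem.Chars.replace.go, List.isPrefixOf, hba, Bool.false_and,
          Bool.false_eq_true, if_neg, not_false_iff, List.map]
        rw [ih t (c :: acc) hlen]
        simp [hc]

-- single-char replace is a pointwise map
theorem replace_single (cs : List Char) (a b : Char) :
    PySem.Chars.replace cs [a] [b] = cs.map (fun c => if c = a then b else c) := by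
  cases cs with
  | nil => rfl
  | cons x t =>
    have := replace_go_single a b (t.length + 1) (x :: t) [] (by simp)
    simpa [PySem.Chars.replace] using this

-- A's chain of single-char replaces is one map with a membership test
theorem foldl_replace_eq_map (l : List Char) : ∀ cs : List Char,
    l.foldl (fun n ch => PySem.Chars.replace n [ch] ['_']) cs
      = cs.map (fun c => if c ∈ l then '_' else c) := by
  induction l with
  | nil => intro cs; simp
  | cons a t ih =>
    intro cs
    rw [List.foldl_cons, replace_single, ih, List.map_map]
    apply List.map_congr_left
    intro c _
    simp only [Function.comp_apply, List.mem_cons]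
    by_cases hc : c = a
    · subst hc; simp
    · simp [hc]

-- the character-level fact: A's replace chain + lower equals B's single-pass map
theorem sanitize_chain_eq_map (cs : List Char) :
    PySem.Chars.lower
      (PySem.Chars.replace
        ((['<', '>', ':', '"', '/', '\\', '|', '?', '*'] : List Char).foldl
          (fun n ch => PySem.Chars.replace n [ch] ['_']) cs) [' '] ['_'])
      = cs.map (fun c =>
          if c ∈ PySem.Set.ofList ['<', '>', ':', '"', '/', '\\', '|', '?', '*', ' ']
          then '_' else PySem.Chars.lowerChar c) := by
  have hset : PySem.Set.ofList ['<', '>', ':', '"', '/', '\\', '|', '?', '*', ' ']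
      = ['<', '>', ':', '"', '/', '\\', '|', '?', '*', ' '] := by decide
  rw [hset, foldl_replace_eq_map, replace_single]
  simp only [PySem.Chars.lower, List.map_map]
  apply List.map_congr_left
  intro c _
  simp only [Function.comp_apply]
  have h10 : c ∈ (['<', '>', ':', '"', '/', '\\', '|', '?', '*', ' '] : List Char)
      ↔ c ∈ (['<', '>', ':', '"', '/', '\\', '|', '?', '*'] : List Char) ∨ c = ' ' := by
    simp [List.mem_cons, or_assoc]
  by_cases hm : c ∈ (['<', '>', ':', '"', '/', '\\', '|', '?', '*'] : List Char)
  · rw [if_pos hm, if_pos (h10.mpr (Or.inl hm))]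
    decide
  · rw [if_neg hm]
    by_cases hsp : c = ' '
    · subst hsp
      rw [if_pos rfl, if_pos (h10.mpr (Or.inr rfl))]
      decide
    · rw [if_neg hsp, if_neg (fun h => ((h10.mp h).elim hm hsp))]

-- a mapped copy of a nonempty string is nonempty (the `or "project"` branch is dead)
theorem ofList_map_ne_empty {s : String} (h : s ≠ "") (f : Char → Char) :
    String.ofList (s.toList.map f) ≠ "" := by
  intro hmk
  apply h
  have h2 : s.toList.map f = [] := by simpa using congrArg String.toList hmk
  have h3 : s.toList = [] := List.map_eq_nil_iff.mp h2
  exact String.toList_inj.mp (by simpa using h3)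

-- ===== VERDICT (by name: the statement is the Claim_ definition above) =====
theorem sanitize_project_name_spec : Claim_equal_sanitize_project_name := by
  intro raw_name _
  unfold Spec_sanitize_project_name sanitize_project_name sanitize_project_name_alt
  set s := PySem.Str.strip raw_name with hs
  by_cases hempty : s = ""
  · simp [hempty]
  · simp only [if_neg hempty]
    have hfold : ∀ (l : List Char) (t : String),
        (l.foldl (fun n ch => PySem.Str.replace n (String.ofList [ch]) "_") t).toList
          = l.foldl (fun n ch => PySem.Chars.replace n [ch] ['_']) t.toList := by
      intro l
      induction l with
      | nil => intro t; rfl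
      | cons x xs ih =>
        intro t
        rw [List.foldl_cons, List.foldl_cons, ih]
        congr 1
        rw [PySem.Str.toList_replace, String.toList_ofList,
            show ("_" : String).toList = ['_'] by decide]
    have key : PySem.Str.lower
        (PySem.Str.replace
          ((['<', '>', ':', '"', '/', '\\', '|', '?', '*'] : List Char).foldl
            (fun n ch => PySem.Str.replace n (String.ofList [ch]) "_") s) " " "_")
        = String.ofList (s.toList.map (fun c =>
            if c ∈ PySem.Set.ofList ['<', '>', ':', '"', '/', '\\', '|', '?', '*', ' ']
            then '_' else PySem.Chars.lowerChar c)) := by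
      apply String.toList_inj.mp
      rw [PySem.Str.toList_lower, PySem.Str.toList_replace, hfold,
          show (" " : String).toList = [' '] by decide,
          show ("_" : String).toList = ['_'] by decide,
          sanitize_chain_eq_map, String.toList_ofList]
    rw [key]
    rw [if_neg (ofList_map_ne_empty hempty _)]
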